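-- pv_equiv track=rewrite | github.com/nesrv/ege-2026 | 23/1.py | f
-- ===== SOURCE A (Python) =====
-- def f(x, y, last):
--     if x > y:
--         return 0
--     if x == y:
--         return 1
--     total = 0
--     # Всегда можно добавить B (прибавить 3)
--     total += f(x + 3, y, 2)
--     # Всегда можно добавить C (умножить на 2)
--     total += f(x * 2, y, 3)
--     # Можно добавить A (вычесть 1), только если предыдущая команда НЕ была A
--     if last != 1:  # если последняя команда не A
--         total += f(x - 1, y, 1)
--     return total
-- ===== SOURCE B (Python) =====
-- def f(x, y, last):
--     # Bottom-up DP over v from y-1 down to x, two tables: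
--     # gA[v] = number of sequences from v when the previous command was A (subtract forbidden),
--     # gN[v] = number of sequences from v when it was not A.
--     if x >= y:
--         return 1 if x == y else 0
--     gA = {}
--     gN = {}
--
--     def val(t, v):
--         if v > y:
--             return 0
--         if v == y:
--             return 1
--         return t.get(v, 0)
--
--     for v in range(y - 1, x - 1, -1):
--         a = val(gN, v + 3) + val(gN, 2 * v)
--         gA[v] = a
--         if v > x:
--             # gN[v] = gA[v] + gA[v-1], with gA[v-1] expanded so the scan stays descending
--             gN[v] = a + val(gN, v + 2) + val(gN, 2 * v - 2)
--     res = gA[x]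
--     if last != 1:
--         res += val(gN, x + 2) + val(gN, 2 * x - 2)
--     return res
-- ===== Notes on version B (the rewrite author's own statement) =====
-- stated objective: alternative
-- what changed: Replaced A's branching top-down recursion by a bottom-up dynamic program: one descending scan from y-1 to x filling two tables (count of sequences with / without a preceding 'subtract' command), O(y-x) subproblems instead of an exponential recursion tree (intended as faster; a timing run could not confirm a ratio: A timed out at n=64 where B returned, and at sizes where both finish A runs in under 1 ms).
import Mathlib
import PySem

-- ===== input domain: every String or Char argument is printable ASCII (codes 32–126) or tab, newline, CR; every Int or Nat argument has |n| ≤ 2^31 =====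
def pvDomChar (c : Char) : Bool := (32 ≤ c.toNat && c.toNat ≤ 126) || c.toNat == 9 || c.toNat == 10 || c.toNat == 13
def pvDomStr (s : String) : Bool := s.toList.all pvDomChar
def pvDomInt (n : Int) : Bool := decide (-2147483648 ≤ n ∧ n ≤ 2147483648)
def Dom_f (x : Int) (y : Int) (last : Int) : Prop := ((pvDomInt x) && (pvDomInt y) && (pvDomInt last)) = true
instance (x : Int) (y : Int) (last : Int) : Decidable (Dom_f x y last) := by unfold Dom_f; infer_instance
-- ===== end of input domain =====

-- B replaces A's branching recursion by a bottom-up dynamic program over two tables, one descending scan (objective: alternative).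

-- ===== PORT A =====
-- Fuel-indexed transliteration of A's recursion; the fuel passed by `f` strictly exceeds the
-- recursion depth on every input satisfying Pre_f, so the 0-fuel branch is never reached there.
def fAux : Nat → Int → Int → Int → Int
  | 0, _, _, _ => 0
  | n + 1, x, y, last =>
    if x > y then 0
    else if x = y then 1
    else
      (0 + fAux n (x + 3) y 2 + fAux n (x * 2) y 3)
        + (if last ≠ 1 then fAux n (x - 1) y 1 else 0)

def f (x : Int) (y : Int) (last : Int) : Int :=
  fAux ((y - x).toNat * 3 + 5) x y last

-- ===== PORT B =====
-- Source B's `val`: table lookup with the base cases (v > y → 0, v = y → 1); t.get(v, 0) → getD.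
def bVal (y : Int) (t : PySem.Dict Int Int) (v : Int) : Int :=
  if v > y then 0 else if v = y then 1 else t.getD v 0

-- one iteration of Source B's descending loop body, state = (gA, gN)
def bStep (x y : Int) (st : PySem.Dict Int Int × PySem.Dict Int Int) (v : Int) :
    PySem.Dict Int Int × PySem.Dict Int Int :=
  let a := bVal y st.2 (v + 3) + bVal y st.2 (2 * v)
  let gA := st.1.insert v a
  if v > x then (gA, st.2.insert v (a + bVal y st.2 (v + 2) + bVal y st.2 (2 * v - 2)))
  else (gA, st.2)

def f_alt (x : Int) (y : Int) (last : Int) : Int :=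
  if x ≥ y then (if x = y then 1 else 0)
  else
    let st := (PySem.List.pyRange (y - 1) (x - 1) (-1)).foldl (bStep x y)
      ((PySem.Dict.empty : PySem.Dict Int Int), (PySem.Dict.empty : PySem.Dict Int Int))
    -- Source B's gA[x]; the key is always present on admitted inputs (v = x is the loop's last value)
    let res := st.1.getD x 0
    if last ≠ 1 then res + bVal y st.2 (x + 2) + bVal y st.2 (2 * x - 2) else res

-- ===== PRECONDITION & SPEC =====
-- Pre_f excludes exactly the inputs on which A's recursion never terminates (the Python raises
-- RecursionError): x < y with x ≤ 0, or x ∈ {1, 2} in a state from which the subtract/double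
-- cycle (2 → 1 → 2) or the x ≤ 0 region is reachable.
def Pre_f (x : Int) (y : Int) (last : Int) : Prop :=
  y ≤ x ∨ 3 ≤ x ∨ (x = 2 ∧ last = 1) ∨ (x = 1 ∧ last = 1 ∧ y = 2)
instance (x : Int) (y : Int) (last : Int) : Decidable (Pre_f x y last) := by
  unfold Pre_f; infer_instance
def pvWitness_f : Int × Int × Int := (3, 12, 2)

def Spec_f (x : Int) (y : Int) (last : Int) (out : Int) : Prop := out = f_alt x y last
instance (x : Int) (y : Int) (last : Int) (out : Int) : Decidable (Spec_f x y last out) := by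
  unfold Spec_f; infer_instance

-- ===== CLAIM (what is proved, stated in full; the proofs are below) =====
def Claim_equal_f : Prop := ∀ (x : Int) (y : Int) (last : Int), Dom_f x y last → Pre_f x y last → Spec_f x y last (f x y last)

-- ===== LEMMAS AND PROOFS =====

-- recursion-depth measure: strictly decreases along A's calls on Pre_f inputs
def muF (x y last : Int) : Nat :=
  if y ≤ x then 0 else (y - x).toNat * 3 + (if last = 1 then 0 else 4)

-- the stable value of A's recursion on terminating inputs
def fS (x y last : Int) : Int := fAux (muF x y last + 1) x y last

lemma fAux_lastIrrel (n : Nat) (x y l l' : Int) (h : l ≠ 1) (h' : l' ≠ 1) :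
    fAux n x y l = fAux n x y l' := by
  cases n with
  | zero => rfl
  | succ n => simp [fAux, h, h']

lemma pre_pos (x y last : Int) (hp : Pre_f x y last) (hlt : x < y) : 1 ≤ x := by
  unfold Pre_f at hp; omega

lemma childB (x y last : Int) (hp : Pre_f x y last) (hlt : x < y) :
    Pre_f (x + 3) y 2 ∧ muF (x + 3) y 2 < muF x y last := by
  unfold Pre_f at *; unfold muF; split_ifs <;> omega

lemma childC (x y last : Int) (hp : Pre_f x y last) (hlt : x < y) :
    Pre_f (x * 2) y 3 ∧ muF (x * 2) y 3 < muF x y last := by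
  unfold Pre_f at *; unfold muF; split_ifs <;> omega

lemma childA (x y last : Int) (hp : Pre_f x y last) (hlt : x < y) (hne : last ≠ 1) :
    Pre_f (x - 1) y 1 ∧ muF (x - 1) y 1 < muF x y last := by
  unfold Pre_f at *; unfold muF; split_ifs <;> omega

lemma fAux_stab : ∀ (n m : Nat) (x y last : Int), Pre_f x y last →
    muF x y last < n → muF x y last < m → fAux n x y last = fAux m x y last := by
  intro n
  induction n with
  | zero => intro m x y last _ h _; exact absurd h (Nat.not_lt_zero _)
  | succ n ih =>
    intro m x y last hp hn hm
    obtain ⟨m', rfl⟩ : ∃ m', m = m' + 1 := ⟨m - 1, by omega⟩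
    by_cases hgt : x > y
    · simp [fAux, hgt]
    · by_cases heq : x = y
      · simp [fAux, heq]
      · have hlt : x < y := by omega
        obtain ⟨hpB, hmB⟩ := childB x y last hp hlt
        obtain ⟨hpC, hmC⟩ := childC x y last hp hlt
        simp only [fAux, if_neg hgt, if_neg heq]
        rw [ih m' (x + 3) y 2 hpB (by omega) (by omega),
            ih m' (x * 2) y 3 hpC (by omega) (by omega)]
        by_cases hne : last = 1
        · simp [hne]
        · obtain ⟨hpA, hmA⟩ := childA x y last hp hlt hne
          rw [if_pos hne, if_pos hne, ih m' (x - 1) y 1 hpA (by omega) (by omega)]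

lemma fAux_eq_fS (n : Nat) (x y last : Int) (hp : Pre_f x y last)
    (hn : muF x y last < n) : fAux n x y last = fS x y last :=
  fAux_stab n (muF x y last + 1) x y last hp hn (by omega)

lemma fS_gt (x y l : Int) (h : y < x) : fS x y l = 0 := by
  unfold fS; simp [fAux, h]

lemma fS_eq (y l : Int) : fS y y l = 1 := by
  unfold fS; simp [fAux]

lemma fS_ne1 (x y l l' : Int) (h : l ≠ 1) (h' : l' ≠ 1) : fS x y l = fS x y l' := by
  unfold fS
  have hmu : muF x y l = muF x y l' := by unfold muF; simp [h, h']
  rw [hmu]; exact fAux_lastIrrel _ _ _ _ _ h h'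

lemma fS_rec (x y last : Int) (hp : Pre_f x y last) (hlt : x < y) :
    fS x y last = (0 + fS (x + 3) y 2 + fS (x * 2) y 3)
        + (if last ≠ 1 then fS (x - 1) y 1 else 0) := by
  obtain ⟨hpB, hmB⟩ := childB x y last hp hlt
  obtain ⟨hpC, hmC⟩ := childC x y last hp hlt
  conv_lhs => rw [show fS x y last = fAux (muF x y last + 1) x y last from rfl]
  simp only [fAux, if_neg (by omega : ¬ x > y), if_neg (by omega : ¬ x = y)]
  rw [fAux_eq_fS _ _ _ _ hpB (by omega), fAux_eq_fS _ _ _ _ hpC (by omega)]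
  by_cases hne : last = 1
  · simp [hne]
  · obtain ⟨hpA, hmA⟩ := childA x y last hp hlt hne
    rw [if_pos hne, if_pos hne, fAux_eq_fS _ _ _ _ hpA (by omega)]

lemma bVal_spec (y : Int) (gN : PySem.Dict Int Int) (u : Int)
    (hget : u < y → gN.get? u = some (fS u y 2)) : bVal y gN u = fS u y 2 := by
  unfold bVal
  split_ifs with h1 h2
  · exact (fS_gt u y 2 (by omega)).symm
  · rw [h2]; exact (fS_eq y 2).symm
  · rw [PySem.Dict.getD_eq_get?_getD, hget (by omega)]; rfl

lemma preV1 (x y v : Int) (hx1 : 1 ≤ x) (hx2 : x = 1 → y = 2) (hxv : x ≤ v) :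
    Pre_f v y 1 := by
  unfold Pre_f
  by_cases h1 : v = 1
  · have : x = 1 := by omega
    have := hx2 this; omega
  · omega

lemma preV2 (x y v : Int) (hx1 : 1 ≤ x) (hx2 : x = 1 → y = 2) (hxv : x < v) (hvy : v < y) :
    Pre_f v y 2 ∧ 3 ≤ v := by
  have h3 : 3 ≤ v := by
    by_cases h2 : v = 2
    · have : x = 1 := by omega
      have := hx2 this; omega
    · omega
  constructor
  · unfold Pre_f; omega
  · exact h3

lemma loopInv (x y : Int) (hx1 : 1 ≤ x) (hx2 : x = 1 → y = 2) :
    ∀ (k : Nat) (v : Int) (st : PySem.Dict Int Int × PySem.Dict Int Int),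
      x - 1 ≤ v → v < y → (v - (x - 1)).toNat = k →
      (∀ w : Int, v < w → w < y → st.1.get? w = some (fS w y 1)) →
      (∀ w : Int, v < w → w < y → x < w → st.2.get? w = some (fS w y 2)) →
      (∀ w : Int, x ≤ w → w < y →
          ((PySem.List.pyRange v (x - 1) (-1)).foldl (bStep x y) st).1.get? w
            = some (fS w y 1)) ∧
      (∀ w : Int, x < w → w < y →
          ((PySem.List.pyRange v (x - 1) (-1)).foldl (bStep x y) st).2.get? w
            = some (fS w y 2)) := by
  intro k
  induction k with
  | zero =>
    intro v st hv hvy hk h1 h2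
    have hvx : v = x - 1 := by omega
    subst hvx
    rw [PySem.List.pyRange_neg_one_eq_nil (le_refl _)]
    simp only [List.foldl_nil]
    exact ⟨fun w hw hwy => h1 w (by omega) hwy,
           fun w hxw hwy => h2 w (by omega) hwy hxw⟩
  | succ k ih =>
    intro v st hv hvy hk h1 h2
    have hvx : x - 1 < v := by omega
    have hxv : x ≤ v := by omega
    rw [PySem.List.pyRange_neg_one_cons hvx]
    simp only [List.foldl_cons]
    -- value inserted into gA at v equals fS v y 1
    have ha : bVal y st.2 (v + 3) + bVal y st.2 (2 * v) = fS v y 1 := by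
      rw [fS_rec v y 1 (preV1 x y v hx1 hx2 hxv) (by omega)]
      rw [bVal_spec y st.2 (v + 3) (fun hw => h2 (v + 3) (by omega) hw (by omega)),
          bVal_spec y st.2 (2 * v) (fun hw => h2 (2 * v) (by omega) hw (by omega))]
      have h23 : fS (v * 2) y 3 = fS (2 * v) y 2 := by
        rw [mul_comm]; exact fS_ne1 _ _ _ _ (by norm_num) (by norm_num)
      rw [h23, if_neg (by norm_num : ¬ (1 : Int) ≠ 1)]
      ring
    -- the new state after one step satisfies the invariant at v - 1
    have hA' : ∀ w : Int, v - 1 < w → w < y →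
        (bStep x y st v).1.get? w = some (fS w y 1) := by
      intro w hw hwy
      have hfst : (bStep x y st v).1 = st.1.insert v (bVal y st.2 (v + 3) + bVal y st.2 (2 * v)) := by
        unfold bStep; split_ifs <;> rfl
      rw [hfst, PySem.Dict.get?_insert]
      by_cases hwv : w = v
      · rw [if_pos hwv, ha, hwv]
      · rw [if_neg hwv]; exact h1 w (by omega) hwy
    have hN' : ∀ w : Int, v - 1 < w → w < y → x < w →
        (bStep x y st v).2.get? w = some (fS w y 2) := by
      intro w hw hwy hxw
      by_cases hvgt : v > x
      · have hsnd : (bStep x y st v).2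
            = st.2.insert v ((bVal y st.2 (v + 3) + bVal y st.2 (2 * v))
                + bVal y st.2 (v + 2) + bVal y st.2 (2 * v - 2)) := by
          unfold bStep; rw [if_pos hvgt]
        rw [hsnd, PySem.Dict.get?_insert]
        by_cases hwv : w = v
        · rw [if_pos hwv, ha, hwv]
          obtain ⟨hpv2, h3v⟩ := preV2 x y v hx1 hx2 hvgt hvy
          rw [fS_rec v y 1 (preV1 x y v hx1 hx2 hxv) (by omega)]
          rw [fS_rec v y 2 hpv2 (by omega)]
          rw [fS_rec (v - 1) y 1 (preV1 x y (v - 1) hx1 hx2 (by omega)) (by omega)]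
          rw [bVal_spec y st.2 (v + 2) (fun hw' => h2 (v + 2) (by omega) hw' (by omega)),
              bVal_spec y st.2 (2 * v - 2) (fun hw' => h2 (2 * v - 2) (by omega) hw' (by omega))]
          have e1 : fS ((v - 1) * 2) y 3 = fS (2 * v - 2) y 2 := by
            have e : (v - 1) * 2 = 2 * v - 2 := by ring
            rw [e]; exact fS_ne1 _ _ _ _ (by norm_num) (by norm_num)
          have e2 : fS ((v - 1) + 3) y 2 = fS (v + 2) y 2 := by
            have e : (v - 1) + 3 = v + 2 := by ring
            rw [e]
          simp only [e1, e2]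
          simp
          ring
        · rw [if_neg hwv]; exact h2 w (by omega) hwy hxw
      · have hveq : v = x := by omega
        have hsnd : (bStep x y st v).2 = st.2 := by
          unfold bStep; rw [if_neg hvgt]
        rw [hsnd]; exact h2 w (by omega) hwy hxw
    exact ih (v - 1) (bStep x y st v) (by omega) (by omega) (by omega) hA' hN'

-- ===== VERDICT (by name: the statement is the Claim_ definition above) =====
theorem f_spec : Claim_equal_f := by
  unfold Claim_equal_f
  intro x y last _ hpre
  unfold Spec_f
  by_cases hge : x ≥ y
  · have h0 : (y - x).toNat = 0 := by omega
    unfold f f_alt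
    rw [h0, if_pos hge]
    by_cases heq : x = y
    · subst heq; simp [fAux]
    · have hgt : x > y := by omega
      simp [fAux, hgt, heq]
  · have hlt : x < y := by omega
    have hx1 : 1 ≤ x := pre_pos x y last hpre hlt
    have hx2 : x = 1 → y = 2 := by intro h1; unfold Pre_f at hpre; omega
    have hf : f x y last = fS x y last := by
      unfold f
      exact fAux_eq_fS _ _ _ _ hpre (by unfold muF; split_ifs <;> omega)
    obtain ⟨hA, hN⟩ := loopInv x y hx1 hx2 (y - 1 - (x - 1)).toNat (y - 1)
      ((PySem.Dict.empty : PySem.Dict Int Int), (PySem.Dict.empty : PySem.Dict Int Int))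
      (by omega) (by omega) rfl
      (fun w hw hwy => by omega)
      (fun w hw hwy _ => by omega)
    simp only [f_alt, if_neg hge]
    have hres : ((PySem.List.pyRange (y - 1) (x - 1) (-1)).foldl (bStep x y)
        ((PySem.Dict.empty : PySem.Dict Int Int), (PySem.Dict.empty : PySem.Dict Int Int))).1.getD x 0
        = fS x y 1 := by
      rw [PySem.Dict.getD_eq_get?_getD, hA x (le_refl x) hlt]; rfl
    by_cases hl1 : last = 1
    · rw [hf, hl1, if_neg (by simp), hres]
    · have hx3 : 3 ≤ x := by unfold Pre_f at hpre; omega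
      rw [hf, if_pos hl1, hres]
      rw [fS_ne1 x y last 2 hl1 (by norm_num)]
      rw [fS_rec x y 2 (by unfold Pre_f; omega) hlt]
      rw [fS_rec x y 1 (by unfold Pre_f; omega) hlt]
      rw [fS_rec (x - 1) y 1 (by unfold Pre_f; omega) (by omega)]
      rw [bVal_spec y _ (x + 2) (fun hw => hN (x + 2) (by omega) hw),
          bVal_spec y _ (2 * x - 2) (fun hw => hN (2 * x - 2) (by omega) hw)]
      have e1 : fS ((x - 1) * 2) y 3 = fS (2 * x - 2) y 2 := by
        have e : (x - 1) * 2 = 2 * x - 2 := by ring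
        rw [e]; exact fS_ne1 _ _ _ _ (by norm_num) (by norm_num)
      have e2 : fS (x - 1 + 3) y 2 = fS (x + 2) y 2 := by
        have e : (x - 1) + 3 = x + 2 := by ring
        rw [e]
      simp only [e1, e2]
      simp
      ring
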